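-- pv_equiv track=rewrite | github.com/sieczkah/Codewars_KATA | 6 kyu/Esolang Interpreters  1 - Introduction to Esolangs and My First Interpreter (MiniStringFuck).py | my_first_interpreter
-- ===== SOURCE A (Python) =====
-- def my_first_interpreter(code):
--     cell = 0
--     msg = ''
--     for i in code:
--         if cell == 256: cell = 0
--         if i == '+':
--             cell += 1
--         elif i == '.':
--             msg += chr(cell)
--     return msg
-- ===== SOURCE B (Python) =====
-- def my_first_interpreter(code):
--     out = []
--     total = 0
--     for seg in code.split('.')[:-1]:
--         total += seg.count('+')
--         out.append(chr(total % 256))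
--     return ''.join(out)
-- ===== Notes on version B (the rewrite author's own statement) =====
-- stated objective: faster
-- what changed: B does not interpret character by character: it splits the code at the output instructions, counts the increment instructions per segment, and emits chr(running total mod 256) once per segment, dropping A's mutable cell and its reset branch.
import Mathlib
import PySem

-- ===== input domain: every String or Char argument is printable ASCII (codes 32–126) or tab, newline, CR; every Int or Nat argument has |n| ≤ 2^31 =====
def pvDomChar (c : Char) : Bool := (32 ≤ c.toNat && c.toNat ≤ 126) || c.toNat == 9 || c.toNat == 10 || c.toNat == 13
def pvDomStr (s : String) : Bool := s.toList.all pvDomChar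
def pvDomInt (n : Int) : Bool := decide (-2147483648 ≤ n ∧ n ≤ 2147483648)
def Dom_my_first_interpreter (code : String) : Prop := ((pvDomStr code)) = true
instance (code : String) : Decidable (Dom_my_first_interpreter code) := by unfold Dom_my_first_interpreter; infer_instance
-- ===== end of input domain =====

-- B replaces A's character-by-character interpreter (mutable cell, reset-at-256 branch)
-- by a staged algorithm: split the code at the output instructions, count the increment
-- instructions per segment, emit one character per segment from the running total mod 256
-- (measurably faster in Python via the C-level str.split/str.count).

-- ===== PORT A =====
-- one loop iteration of A: reset the cell at 256, then dispatch on the character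
def pvStepA (s : Int × List Char) (i : Char) : Int × List Char :=
  let cell := if s.1 = 256 then 0 else s.1
  if i = '+' then (cell + 1, s.2)
  else if i = '.' then (cell, s.2 ++ [Char.ofNat cell.toNat])
  else (cell, s.2)

def my_first_interpreter (code : String) : String :=
  String.mk (code.toList.foldl pvStepA (0, [])).2

-- ===== PORT B =====
-- one iteration of B's for-loop over the segments: add the segment's '+' count to the
-- running total and append chr(total % 256).
-- seg.count('+') in Python: for the single character '+' this is exactly the number of
-- '+' elements of the segment, ported as List.count.
def pvSegLoop (s : Int × List Char) (seg : List Char) : Int × List Char :=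
  let total := s.1 + (seg.count '+' : Int)
  (total, s.2 ++ [Char.ofNat (PySem.Int.mod total 256).toNat])

-- code.split('.') for the one-character non-empty separator '.' is exactly
-- List.splitOn '.' on the characters; [:-1] is dropLast; ''.join of the
-- accumulated one-character strings is String.mk of the accumulated chars.
def my_first_interpreter_alt (code : String) : String :=
  String.mk (((code.toList.splitOn '.').dropLast).foldl pvSegLoop (0, [])).2

-- ===== PRECONDITION & SPEC =====
def Spec_my_first_interpreter (code : String) (out : String) : Prop := out = my_first_interpreter_alt code
instance (code : String) (out : String) : Decidable (Spec_my_first_interpreter code out) := by unfold Spec_my_first_interpreter; infer_instance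

-- ===== CLAIM (what is proved, stated in full; the proofs are below) =====
def Claim_equal_my_first_interpreter : Prop := ∀ (code : String), Dom_my_first_interpreter code → Spec_my_first_interpreter code (my_first_interpreter code)

-- ===== LEMMAS AND PROOFS =====

-- Prepending a non-'.' char to the code shifts B's running total by the char's '+'
-- contribution and changes nothing else.
theorem pv_shift (c : Char) (hc : ¬ c = '.') (t : List Char) (count : Int) (msg : List Char) :
    ((((c :: t).splitOn '.').dropLast).foldl pvSegLoop (count, msg)).2
    = ((((t.splitOn '.').dropLast).foldl pvSegLoop
        (count + (if c = '+' then 1 else 0), msg))).2 := by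
  rw [List.splitOn, List.splitOn, List.splitOnP_cons]
  simp only [beq_iff_eq, hc, if_false]
  rcases h : t.splitOnP (· == '.') with _ | ⟨s, segs⟩
  · exact absurd h (List.splitOnP_ne_nil _ t)
  · rcases segs with _ | ⟨s2, rest⟩
    · simp [List.modifyHead]
    · simp only [List.modifyHead, List.dropLast_cons₂, List.foldl_cons]
      have hδ : (count + ((List.count '+' s + if c = '+' then 1 else 0 : Nat) : Int))
          = (count + if c = '+' then 1 else 0) + (List.count '+' s : Int) := by
        push_cast; split_ifs <;> ring
      have hstep : pvSegLoop (count, msg) (c :: s)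
          = pvSegLoop (count + (if c = '+' then 1 else 0), msg) s := by
        simp only [pvSegLoop, List.count_cons, beq_iff_eq, hδ]
      rw [hstep]

-- Loop invariant: A's cell stays in [0, 256] and is congruent to B's running total
-- mod 256, and the accumulated outputs coincide.
theorem pv_loop_eq (l : List Char) (cell count : Int) (msg : List Char)
    (h0 : 0 ≤ cell) (h1 : cell ≤ 256) (h2 : cell % 256 = count % 256) :
    (l.foldl pvStepA (cell, msg)).2
    = (((l.splitOn '.').dropLast).foldl pvSegLoop (count, msg)).2 := by
  induction l generalizing cell count msg with
  | nil => rfl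
  | cons c t ih =>
    have hmod : PySem.Int.mod count 256 = count % 256 :=
      PySem.Int.mod_eq_emod_of_pos (by omega)
    have hcell : (if cell = 256 then (0:Int) else cell) = count % 256 := by
      split_ifs with h
      · omega
      · have : cell % 256 = cell := Int.emod_eq_of_lt h0 (by omega)
        omega
    have hlo : (0:Int) ≤ count % 256 := Int.emod_nonneg count (by omega)
    have hhi : count % 256 < 256 := Int.emod_lt_of_pos count (by omega)
    by_cases hd : c = '.'
    · subst hd
      have hA : pvStepA (cell, msg) '.'
          = (count % 256, msg ++ [Char.ofNat (count % 256).toNat]) := by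
        simp [pvStepA, hcell]
      have hsplit : (('.' :: t).splitOn '.') = [] :: t.splitOn '.' := by
        rw [List.splitOn, List.splitOnP_cons]; simp [List.splitOn]
      have hne : t.splitOn '.' ≠ [] := List.splitOnP_ne_nil _ t
      rw [List.foldl_cons, hA, hsplit, List.dropLast_cons_of_ne_nil hne,
        List.foldl_cons]
      have hB : pvSegLoop (count, msg) []
          = (count, msg ++ [Char.ofNat (count % 256).toNat]) := by
        simp [pvSegLoop]
      rw [hB]
      exact ih _ _ _ (by omega) (by omega) (by omega)
    · rw [List.foldl_cons, pv_shift c hd t count msg]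
      by_cases hp : c = '+'
      · have hA : pvStepA (cell, msg) c = (count % 256 + 1, msg) := by
          simp [pvStepA, hp, hcell]
        rw [hA, if_pos hp]
        exact ih _ _ _ (by omega) (by omega) (by omega)
      · have hA : pvStepA (cell, msg) c = (count % 256, msg) := by
          simp [pvStepA, hp, hd, hcell]
        rw [hA, if_neg hp]
        exact ih _ _ _ (by omega) (by omega) (by omega)

-- ===== VERDICT (by name: the statement is the Claim_ definition above) =====
theorem my_first_interpreter_spec : Claim_equal_my_first_interpreter := by
  intro code _
  unfold Spec_my_first_interpreter my_first_interpreter my_first_interpreter_alt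
  exact congrArg String.mk (pv_loop_eq _ 0 0 [] (by omega) (by omega) rfl)
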